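-- pv_equiv track=rewrite | github.com/sayantan94/WordPyramid | App/ServerApp.py | get
-- ===== SOURCE A (Python) =====
-- import collections
--
-- def get(string):
--     counter = collections.Counter(string.strip())
--     isPyramid = True
--     seen = set()
--     for char,count in counter.items():
--         if not char or count in seen:
--             isPyramid = False
--             break
--         else:
--             seen.add(count)
--
--     return {'isPyramid':isPyramid}
-- ===== SOURCE B (Python) =====
-- import collections
--
--
-- def get(string):
--     # Batch check: sort the character frequencies and verify no two adjacent
--     # sorted values coincide (distinct counts <=> no adjacent duplicates).
--     vals = sorted(collections.Counter(string.strip()).values())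
--     isPyramid = all(a != b for a, b in zip(vals, vals[1:]))
--     return {'isPyramid': isPyramid}
-- ===== Notes on version B (the rewrite author's own statement) =====
-- stated objective: simpler
-- what changed: Replaced the incremental seen-set loop with early break by a batch computation: sort the Counter's frequency values once and check that no two adjacent sorted values are equal; the dead always-false truthiness guard on the character is dropped.
import Mathlib
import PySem

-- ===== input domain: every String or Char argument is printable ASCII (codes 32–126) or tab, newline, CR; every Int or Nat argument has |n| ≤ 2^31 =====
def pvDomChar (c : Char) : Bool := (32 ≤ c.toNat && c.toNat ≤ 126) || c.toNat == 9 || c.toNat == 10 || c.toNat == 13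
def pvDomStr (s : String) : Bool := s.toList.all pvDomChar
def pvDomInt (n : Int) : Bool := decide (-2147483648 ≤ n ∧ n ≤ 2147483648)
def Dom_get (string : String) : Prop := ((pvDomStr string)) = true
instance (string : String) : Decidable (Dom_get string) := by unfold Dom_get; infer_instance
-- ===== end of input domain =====

-- B sorts the Counter's frequency values once and checks no two adjacent sorted
-- values are equal, instead of A's incremental seen-set loop with early break
-- (objective: simpler).

-- ===== PORT A =====
-- the for-loop over counter.items() with the early break; 'not char' on a
-- single-character string is always False, kept literally as 'false ||'
def getLoopA : List (Char × Int) → PySem.Set Int → Bool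
  | [], _ => true
  | (_, count) :: rest, seen =>
      if false || PySem.Set.contains seen count then false
      else getLoopA rest (PySem.Set.add seen count)

def get (string : String) : List (String × Bool) :=
  let counter := PySem.Dict.counter (PySem.Str.strip string).toList
  [("isPyramid", getLoopA counter.items PySem.Set.empty)]

-- ===== PORT B =====
def get_alt (string : String) : List (String × Bool) :=
  let vals := PySem.List.sorted (PySem.Dict.counter (PySem.Str.strip string).toList).values (fun x => x) false
  [("isPyramid", (vals.zip (PySem.List.slice vals (some 1) none)).all (fun p => p.1 != p.2))]

-- ===== PRECONDITION & SPEC =====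
def Spec_get (string : String) (out : List (String × Bool)) : Prop := out = get_alt string
instance (string : String) (out : List (String × Bool)) : Decidable (Spec_get string out) := by unfold Spec_get; infer_instance

-- ===== CLAIM (what is proved, stated in full; the proofs are below) =====
def Claim_equal_get : Prop := ∀ (string : String), Dom_get string → Spec_get string (get string)

-- ===== LEMMAS AND PROOFS =====

-- ===== VERDICT (by name: the statement is the Claim_ definition above) =====
-- A's loop decides Nodup of the remaining counts relative to 'seen'
lemma getLoopA_eq (l : List (Char × Int)) : ∀ (seen : List Int), seen.Nodup →
    getLoopA l seen = decide (seen ++ l.map Prod.snd).Nodup := by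
  induction l with
  | nil => intro seen h; simp [getLoopA, h]
  | cons p rest ih =>
    intro seen h
    obtain ⟨c, v⟩ := p
    by_cases hv : v ∈ seen
    · have : ¬ (seen ++ (v :: rest.map Prod.snd)).Nodup := by
        intro hnd
        exact (List.disjoint_of_nodup_append hnd) hv List.mem_cons_self
      simp [getLoopA, hv, this]
    · have hadd : PySem.Set.add seen v = seen ++ [v] := by
        simp [PySem.Set.add, hv]
      have h2 : (seen ++ [v]).Nodup :=
        List.Nodup.append h (List.nodup_singleton v) (by simpa using hv)
      have := ih (seen ++ [v]) h2
      simp [getLoopA, hv, this, List.append_assoc]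

-- adjacent-distinct on a ≤-sorted list decides Nodup
lemma adj_ne_eq_nodup : ∀ (vals : List Int), vals.Pairwise (· ≤ ·) →
    ((vals.zip (vals.drop 1)).all (fun p => p.1 != p.2)) = decide vals.Nodup := by
  intro vals
  induction vals with
  | nil => intro _; simp
  | cons a t ih =>
    intro hp
    cases t with
    | nil => simp
    | cons b u =>
      have hp' := hp.of_cons
      have hab : a ≤ b := (List.pairwise_cons.1 hp).1 b List.mem_cons_self
      have hrest := ih hp'
      by_cases hEq : a = b
      · subst hEq
        simp [List.zip]
      · have hnot : a ∉ b :: u := by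
          intro hmem
          rcases List.mem_cons.1 hmem with h1 | h2
          · exact hEq h1
          · have hbu : ∀ x ∈ u, b ≤ x := (List.pairwise_cons.1 hp').1
            have : b ≤ a := hbu a h2
            omega
        simp only [List.zip, List.drop] at hrest ⊢
        simp [hEq, hnot, hrest, List.nodup_cons]

theorem get_spec : Claim_equal_get := by
  intro s _
  show _root_.get s = get_alt s
  unfold _root_.get get_alt
  dsimp only
  rw [PySem.List.slice_from_one, ← List.drop_one]
  have hA : getLoopA (PySem.Dict.counter (PySem.Str.strip s).toList).items PySem.Set.empty
      = decide ((PySem.Dict.counter (PySem.Str.strip s).toList).items.map Prod.snd).Nodup := by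
    simpa using getLoopA_eq (PySem.Dict.counter (PySem.Str.strip s).toList).items [] List.nodup_nil
  have hperm : (PySem.List.sorted (PySem.Dict.counter (PySem.Str.strip s).toList).values (fun x => x) false).Perm
      (PySem.Dict.counter (PySem.Str.strip s).toList).values :=
    PySem.List.sorted_perm _ _ _
  have hB : ((PySem.List.sorted (PySem.Dict.counter (PySem.Str.strip s).toList).values (fun x => x) false).zip
      ((PySem.List.sorted (PySem.Dict.counter (PySem.Str.strip s).toList).values (fun x => x) false).drop 1)).all
      (fun p => p.1 != p.2)
      = decide ((PySem.Dict.counter (PySem.Str.strip s).toList).items.map Prod.snd).Nodup := by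
    rw [adj_ne_eq_nodup _
      (by simpa using PySem.List.sorted_pairwise (PySem.Dict.counter (PySem.Str.strip s).toList).values (fun x => x))]
    simp only [decide_eq_decide]; exact hperm.nodup_iff
  rw [hA, hB]
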